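-- pv_equiv track=rewrite | github.com/Lands54/Pantheon | scripts/check_import_cycles.py | _dedupe_cycles
-- ===== SOURCE A (Python) =====
-- from typing import Iterable
--
-- def _dedupe_cycles(cycles: Iterable[list[str]]) -> list[list[str]]:
--     seen: set[tuple[str, ...]] = set()
--     uniq: list[list[str]] = []
--     for cyc in cycles:
--         body = cyc[:-1]
--         if not body:
--             continue
--         rots = [tuple(body[i:] + body[:i]) for i in range(len(body))]
--         key = min(rots)
--         if key in seen:
--             continue
--         seen.add(key)
--         uniq.append(cyc)
--     return uniq
-- ===== SOURCE B (Python) =====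
-- from typing import Iterable
--
-- def _is_rotation(a: list[str], b: list[str]) -> bool:
--     n = len(b)
--     if len(a) != n:
--         return False
--     d = b + b
--     return any(d[i:i + n] == a for i in range(n))
--
-- def _dedupe_cycles(cycles: Iterable[list[str]]) -> list[list[str]]:
--     uniq: list[list[str]] = []
--     bodies: list[list[str]] = []
--     for cyc in cycles:
--         body = cyc[:-1]
--         if not body:
--             continue
--         if any(_is_rotation(body, prev) for prev in bodies):
--             continue
--         bodies.append(body)
--         uniq.append(cyc)
--     return uniq
-- ===== Notes on version B (the rewrite author's own statement) =====
-- stated objective: alternative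
-- what changed: B drops the canonical-key machinery (all rotations materialised, min, hash set) and instead keeps the bodies already accepted and tests each new body for rotation-equivalence directly by scanning length-n windows of prev+prev.
import Mathlib
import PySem

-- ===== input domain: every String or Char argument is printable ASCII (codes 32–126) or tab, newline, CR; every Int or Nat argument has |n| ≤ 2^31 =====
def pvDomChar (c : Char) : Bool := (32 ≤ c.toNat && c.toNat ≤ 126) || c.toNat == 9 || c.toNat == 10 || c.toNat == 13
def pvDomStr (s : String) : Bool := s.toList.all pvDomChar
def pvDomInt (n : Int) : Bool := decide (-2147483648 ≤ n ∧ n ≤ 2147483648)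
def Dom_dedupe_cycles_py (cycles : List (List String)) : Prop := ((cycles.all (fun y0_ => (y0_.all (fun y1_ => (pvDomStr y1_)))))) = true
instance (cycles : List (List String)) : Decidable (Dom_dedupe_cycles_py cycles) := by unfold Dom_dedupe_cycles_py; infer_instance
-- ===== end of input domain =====

-- B replaces A's canonical-key scheme (materialise every rotation of the body, take the min,
-- store it in a set) by keeping the accepted bodies and testing rotation-equivalence of each
-- new body directly against them via length-n windows of prev+prev; objective: alternative.

-- ===== PORT A =====
-- key = min over all rotations of body (rotation i = body[i:] + body[:i]); body ≠ [] in the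
-- branch guarantees the rotation list is nonempty, so the .getD [] default is never used.
def dedupe_cycles_py (cycles : List (List String)) : List (List String) :=
  (cycles.foldl
    (fun (st : PySem.Set (List String) × List (List String)) cyc =>
      let body := PySem.List.slice cyc none (some (-1))
      if body = [] then st
      else
        let rots := (PySem.List.pyRange 0 (body.length : Int) 1).map
          (fun i => PySem.List.slice body (some i) none ++ PySem.List.slice body none (some i))
        let key := (PySem.List.min? rots (fun x => x)).getD []
        if key ∈ st.1 then st
        else (PySem.Set.add st.1 key, st.2 ++ [cyc]))
    (PySem.Set.empty, [])).2

-- ===== PORT B =====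
def isRotationB (a b : List String) : Bool :=
  let n := b.length
  if a.length ≠ n then false
  else
    let d := b ++ b
    (PySem.List.pyRange 0 (n : Int) 1).any
      (fun i => PySem.List.slice d (some i) (some (i + (n : Int))) == a)

def dedupeGoB (cycles bodies uniq : List (List String)) : List (List String) :=
  match cycles with
  | [] => uniq
  | cyc :: rest =>
    let body := PySem.List.slice cyc none (some (-1))
    if body = [] then dedupeGoB rest bodies uniq
    else if bodies.any (fun prev => isRotationB body prev) then dedupeGoB rest bodies uniq
    else dedupeGoB rest (bodies ++ [body]) (uniq ++ [cyc])

def dedupe_cycles_py_alt (cycles : List (List String)) : List (List String) :=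
  dedupeGoB cycles [] []

-- ===== PRECONDITION & SPEC =====
def Spec_dedupe_cycles_py (cycles : List (List String)) (out : List (List String)) : Prop := out = dedupe_cycles_py_alt cycles
instance (cycles : List (List String)) (out : List (List String)) : Decidable (Spec_dedupe_cycles_py cycles out) := by unfold Spec_dedupe_cycles_py; infer_instance

-- ===== CLAIM (what is proved, stated in full; the proofs are below) =====
def Claim_equal_dedupe_cycles_py : Prop := ∀ (cycles : List (List String)), Dom_dedupe_cycles_py cycles → Spec_dedupe_cycles_py cycles (dedupe_cycles_py cycles)

-- ===== LEMMAS AND PROOFS =====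

-- the rotation list of A, in normal form, and the canonical key it produces
def rotsOf (b : List String) : List (List String) :=
  (List.range b.length).map (fun i => b.rotate i)

def keyOf (b : List String) : List String :=
  (PySem.List.min? (rotsOf b) (fun x => x)).getD []

lemma rotsA_eq (b : List String) :
    (PySem.List.pyRange 0 (b.length : Int) 1).map
      (fun i => PySem.List.slice b (some i) none ++ PySem.List.slice b none (some i))
      = rotsOf b := by
  rw [PySem.List.pyRange_one]
  simp only [Int.sub_zero, Int.toNat_natCast, List.map_map, rotsOf]
  apply List.map_congr_left
  intro i hi
  simp only [List.mem_range] at hi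
  simp only [Function.comp, Int.zero_add]
  rw [PySem.List.slice_from_natCast, PySem.List.slice_to_natCast,
    List.rotate_eq_drop_append_take (le_of_lt hi)]

lemma mem_rotsOf {b x : List String} (hb : b ≠ []) : x ∈ rotsOf b ↔ b ~r x := by
  have hlen : 0 < b.length := List.length_pos_iff.mpr hb
  constructor
  · intro hx
    simp only [rotsOf, List.mem_map, List.mem_range] at hx
    obtain ⟨i, _, hi⟩ := hx
    exact ⟨i, hi⟩
  · intro hr
    obtain ⟨n, _, hn⟩ := List.isRotated_iff_mod.mp hr
    simp only [rotsOf, List.mem_map, List.mem_range]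
    exact ⟨n % b.length, Nat.mod_lt _ hlen, by rw [List.rotate_mod, hn]⟩

-- min? at the core List-lt instance: its result is Lex-minimal
def minStepS : Option (List String) → List String → Option (List String) :=
  fun acc x => match acc with
  | none => some x
  | some m => if x < m then some x else some m

lemma min?_eq_foldl (xs : List (List String)) :
    PySem.List.min? xs (fun x => x) = xs.foldl minStepS none := by
  simp only [PySem.List.min?]
  congr 1
  funext acc x
  cases acc <;> rfl

lemma minFold_spec (t : List (List String)) :
    ∀ (acc : Option (List String)) (m : List String),
      t.foldl minStepS acc = some m →
      (∀ y ∈ t, ¬ List.Lex (· < ·) y m) ∧ (∀ a, acc = some a → ¬ List.Lex (· < ·) a m) := by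
  induction t with
  | nil =>
    intro acc m h
    simp only [List.foldl_nil] at h
    subst h
    exact ⟨by simp, fun a ha => by cases ha; exact lt_irrefl (α := List String) m⟩
  | cons x t ih =>
    intro acc m h
    simp only [List.foldl_cons] at h
    obtain ⟨ht, hstep⟩ := ih _ m h
    have hx : ¬ List.Lex (· < ·) x m := by
      cases acc with
      | none => exact hstep x rfl
      | some m' =>
        by_cases hc : List.Lex (· < ·) x m'
        · have : x < m' := (List.lt_iff_lex_lt x m').mpr hc
          exact hstep x (by simp [minStepS, this])
        · have hnc : ¬ x < m' := fun hlt => hc ((List.lt_iff_lex_lt x m').mp hlt)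
          have hm' : ¬ List.Lex (· < ·) m' m := hstep m' (by simp [minStepS, hnc])
          intro hxm
          rcases lt_trichotomy (α := List String) x m' with h1 | h1 | h1
          · exact hc h1
          · exact hm' (h1 ▸ hxm)
          · exact hm' (lt_trans (α := List String) h1 hxm)
    refine ⟨fun y hy => ?_, fun a ha => ?_⟩
    · rcases List.mem_cons.mp hy with rfl | hy
      · exact hx
      · exact ht y hy
    · cases acc with
      | none => cases ha
      | some m' =>
        have hma : m' = a := Option.some.inj ha
        subst hma
        by_cases hc : List.Lex (· < ·) x m'
        · intro hm'm
          exact hx (lt_trans (α := List String) hc hm'm)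
        · have hnc : ¬ x < m' := fun hlt => hc ((List.lt_iff_lex_lt x m').mp hlt)
          exact hstep m' (by simp [minStepS, hnc])

lemma min?_isMin_core {xs : List (List String)} {m : List String}
    (h : PySem.List.min? xs (fun x => x) = some m) :
    ∀ y ∈ xs, ¬ List.Lex (· < ·) y m :=
  (minFold_spec xs none m (by rw [← min?_eq_foldl]; exact h)).1

lemma rotsOf_ne_nil {b : List String} (hb : b ≠ []) : rotsOf b ≠ [] := by
  simp [rotsOf, List.range_eq_nil, List.length_eq_zero_iff, hb]

lemma keyOf_mem (b : List String) (hb : b ≠ []) : keyOf b ∈ rotsOf b := by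
  unfold keyOf
  cases h : PySem.List.min? (rotsOf b) (fun x => x) with
  | none => exact absurd ((PySem.List.min?_eq_none_iff _ _).mp h) (rotsOf_ne_nil hb)
  | some m => simpa using PySem.List.min?_mem h

lemma keyOf_min (b : List String) (hb : b ≠ []) {y : List String} (hy : y ∈ rotsOf b) :
    ¬ List.Lex (· < ·) y (keyOf b) := by
  unfold keyOf
  cases h : PySem.List.min? (rotsOf b) (fun x => x) with
  | none => exact absurd ((PySem.List.min?_eq_none_iff _ _).mp h) (rotsOf_ne_nil hb)
  | some m => simpa using min?_isMin_core h y hy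

lemma keyOf_eq_iff {a b : List String} (ha : a ≠ []) (hb : b ≠ []) :
    keyOf a = keyOf b ↔ a ~r b := by
  constructor
  · intro h
    have h1 : a ~r keyOf a := (mem_rotsOf ha).mp (keyOf_mem a ha)
    have h2 : b ~r keyOf b := (mem_rotsOf hb).mp (keyOf_mem b hb)
    exact h1.trans (h ▸ h2.symm)
  · intro hr
    have hmem : ∀ x, x ∈ rotsOf a ↔ x ∈ rotsOf b := by
      intro x
      rw [mem_rotsOf ha, mem_rotsOf hb]
      exact ⟨fun h => hr.symm.trans h, fun h => hr.trans h⟩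
    have h1 := keyOf_min a ha ((hmem _).mpr (keyOf_mem b hb))
    have h2 := keyOf_min b hb ((hmem _).mp (keyOf_mem a ha))
    exact ((lt_trichotomy (α := List String) (keyOf a) (keyOf b)).resolve_left h2).resolve_right h1

lemma window_eq_rotate (b : List String) (i : Nat) (hi : i < b.length) :
    ((b ++ b).drop i).take b.length = b.rotate i := by
  rw [List.rotate_eq_drop_append_take (le_of_lt hi), List.drop_append_of_le_length (le_of_lt hi),
    List.take_append]
  congr 1
  · exact List.take_of_length_le (by simp)
  · congr 1
    simp
    omega

lemma isRotationB_iff {a b : List String} (hb : b ≠ []) :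
    isRotationB a b = true ↔ b ~r a := by
  have hlen : 0 < b.length := List.length_pos_iff.mpr hb
  unfold isRotationB
  by_cases hl : a.length ≠ b.length
  · simp only [if_pos hl]
    constructor
    · intro h; cases h
    · intro hr
      obtain ⟨n, hn⟩ := hr
      exact absurd (by rw [← hn]; simp) hl
  · rw [not_ne_iff] at hl
    simp only [if_neg (by omega : ¬ a.length ≠ b.length)]
    rw [List.any_eq_true]
    constructor
    · rintro ⟨i, hi, heq⟩
      rw [PySem.List.mem_pyRange_one] at hi
      obtain ⟨hi0, hin⟩ := hi
      have hnat : i = ((i.toNat : Nat) : Int) := by omega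
      have hlt : i.toNat < b.length := by omega
      rw [hnat, PySem.List.slice_natCast_add, window_eq_rotate b i.toNat hlt] at heq
      exact ⟨i.toNat, beq_iff_eq.mp heq⟩
    · intro hr
      obtain ⟨n, _, hn⟩ := List.isRotated_iff_mod.mp hr
      refine ⟨((n % b.length : Nat) : Int), ?_, ?_⟩
      · rw [PySem.List.mem_pyRange_one]
        constructor
        · omega
        · exact_mod_cast Nat.mod_lt _ hlen
      · rw [PySem.List.slice_natCast_add, window_eq_rotate b _ (Nat.mod_lt _ hlen),
          List.rotate_mod, hn]
        simp

-- A's fold step, with the rotation list and its min collapsed to the canonical key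
def stepA (st : PySem.Set (List String) × List (List String)) (cyc : List String) :
    PySem.Set (List String) × List (List String) :=
  let body := PySem.List.slice cyc none (some (-1))
  if body = [] then st
  else if keyOf body ∈ st.1 then st
  else (PySem.Set.add st.1 (keyOf body), st.2 ++ [cyc])

lemma stepA_eq :
    (fun (st : PySem.Set (List String) × List (List String)) cyc =>
      let body := PySem.List.slice cyc none (some (-1))
      if body = [] then st
      else
        let rots := (PySem.List.pyRange 0 (body.length : Int) 1).map
          (fun i => PySem.List.slice body (some i) none ++ PySem.List.slice body none (some i))
        let key := (PySem.List.min? rots (fun x => x)).getD []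
        if key ∈ st.1 then st
        else (PySem.Set.add st.1 key, st.2 ++ [cyc])) = stepA := by
  funext st cyc
  simp only [stepA, keyOf, rotsA_eq]

-- the loop invariant: A's seen-set is exactly the canonical keys of B's kept bodies
lemma go_eq (cycles : List (List String)) :
    ∀ (bodies uniq : List (List String)), (∀ p ∈ bodies, p ≠ []) →
    (cycles.foldl stepA (bodies.map keyOf, uniq)).2 = dedupeGoB cycles bodies uniq := by
  induction cycles with
  | nil => intro bodies uniq _; simp [dedupeGoB]
  | cons cyc rest ih =>
    intro bodies uniq hinv
    simp only [List.foldl_cons]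
    rw [dedupeGoB]
    by_cases hb : PySem.List.slice cyc none (some (-1)) = []
    · have h1 : stepA (bodies.map keyOf, uniq) cyc = (bodies.map keyOf, uniq) := by
        simp [stepA, hb]
      rw [h1]
      simp only [hb, if_true]
      exact ih bodies uniq hinv
    · set body := PySem.List.slice cyc none (some (-1)) with hbody
      have hmem : (keyOf body ∈ bodies.map keyOf) ↔
          (bodies.any (fun prev => isRotationB body prev) = true) := by
        rw [List.mem_map, List.any_eq_true]
        constructor
        · rintro ⟨p, hp, hpk⟩
          exact ⟨p, hp, (isRotationB_iff (hinv p hp)).mpr ((keyOf_eq_iff (hinv p hp) hb).mp hpk)⟩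
        · rintro ⟨p, hp, hpr⟩
          exact ⟨p, hp, (keyOf_eq_iff (hinv p hp) hb).mpr ((isRotationB_iff (hinv p hp)).mp hpr)⟩
      by_cases hc : bodies.any (fun prev => isRotationB body prev) = true
      · have h1 : stepA (bodies.map keyOf, uniq) cyc = (bodies.map keyOf, uniq) := by
          simp only [stepA, ← hbody, if_neg hb, if_pos (hmem.mpr hc)]
        rw [h1]
        simp only [if_neg hb, if_pos hc]
        exact ih bodies uniq hinv
      · have hnm : keyOf body ∉ bodies.map keyOf := fun h => hc (hmem.mp h)
        have h1 : stepA (bodies.map keyOf, uniq) cyc =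
            ((bodies ++ [body]).map keyOf, uniq ++ [cyc]) := by
          simp only [stepA, ← hbody, if_neg hb, if_neg hnm]
          rw [PySem.Set.add_of_not_mem hnm]
          simp
        rw [h1]
        simp only [if_neg hb, if_neg hc]
        refine ih (bodies ++ [body]) (uniq ++ [cyc]) ?_
        intro p hp
        rcases List.mem_append.mp hp with h | h
        · exact hinv p h
        · simp only [List.mem_singleton] at h
          exact h ▸ hb

-- ===== VERDICT (by name: the statement is the Claim_ definition above) =====
theorem dedupe_cycles_py_spec : Claim_equal_dedupe_cycles_py := by
  intro cycles _
  unfold Spec_dedupe_cycles_py dedupe_cycles_py dedupe_cycles_py_alt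
  rw [stepA_eq]
  have := go_eq cycles [] [] (by simp)
  simpa using this
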